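-- pv_equiv track=rewrite | github.com/edugbau/IAV_UMA_2025 | Practica evaluable 1/watersort/game.py | visualize_state
-- ===== SOURCE A (Python) =====
-- from typing import Iterable, List, Sequence, Tuple
--
-- State = Tuple[Tuple[str, ...], ...]
--
-- def visualize_state(state: State) -> str:
--     """Return a human-friendly multiline representation."""
--
--     max_height = max((len(tube) for tube in state), default=0)
--     rows = []
--     for level in range(max_height - 1, -1, -1):
--         row = []
--         for tube in state:
--             row.append(tube[level] if level < len(tube) else " ")
--         rows.append(" | ".join(row))
--     rows.append("--" * len(state))
--     rows.append("   ".join(str(i) for i in range(len(state))))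
--     return "\n".join(rows)
-- ===== SOURCE B (Python) =====
-- def visualize_state(state):
--     """Return a human-friendly multiline representation (transpose-based)."""
--     n = len(state)
--     h = max(map(len, state), default=0)
--     padded = [list(tube) + [" "] * (h - len(tube)) for tube in state]
--     rows = [" | ".join(level) for level in zip(*padded)]
--     rows.reverse()
--     rows.append("--" * n)
--     rows.append("   ".join(str(i) for i in range(n)))
--     return "\n".join(rows)
-- ===== Notes on version B (the rewrite author's own statement) =====
-- stated objective: idiomatic
-- what changed: B pads each tube to the max height and builds the rows by transposing the tubes (a zip pass, one row per level) then reverses, instead of A's nested per-level/per-tube conditional index addressing.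
import Mathlib
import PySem

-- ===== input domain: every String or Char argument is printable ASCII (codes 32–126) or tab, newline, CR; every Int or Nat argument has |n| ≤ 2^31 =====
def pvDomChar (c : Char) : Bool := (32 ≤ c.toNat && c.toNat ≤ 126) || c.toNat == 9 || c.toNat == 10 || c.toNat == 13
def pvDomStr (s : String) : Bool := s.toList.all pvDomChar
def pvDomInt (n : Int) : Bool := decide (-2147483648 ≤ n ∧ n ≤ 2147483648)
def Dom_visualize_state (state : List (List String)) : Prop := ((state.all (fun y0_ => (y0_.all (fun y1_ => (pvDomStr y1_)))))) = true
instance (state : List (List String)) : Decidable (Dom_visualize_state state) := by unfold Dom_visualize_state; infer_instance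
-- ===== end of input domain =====

-- B renders the grid by padding each tube and transposing (a zip pass) instead of
-- A's nested level/tube index addressing; objective: more idiomatic decomposition.

-- ===== PORT A =====
-- literal transliteration of A: max height, then for each level from top to bottom
-- index into every tube, then separator and index line.
def visualize_state (state : List (List String)) : String :=
  let max_height : Int :=
    (PySem.List.max? (state.map (fun tube => (tube.length : Int))) (fun x => x)).getD 0
  let rows : List String :=
    (PySem.List.pyRange (max_height - 1) (-1) (-1)).map (fun level =>
      PySem.Str.join " | "
        (state.map (fun tube =>
          if level < (tube.length : Int) then (PySem.List.pyGet? tube level).getD " " else " ")))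
  let rows := rows ++ [String.ofList (PySem.List.pyRepeat "--".toList (state.length : Int))]
  let rows := rows ++
    [PySem.Str.join "   " ((PySem.List.pyRange 0 (state.length : Int) 1).map PySem.Int.toStr)]
  PySem.Str.join "\n" rows

-- ===== PORT B =====
-- zip(*padded): emit one row per level (bottom-up) while every column is nonempty.
def zipCols (cols : List (List String)) : List (List String) :=
  if h : cols ≠ [] ∧ cols.all (fun c => !c.isEmpty) then
    (cols.map (fun c => c.headD " ")) :: zipCols (cols.map (fun c => c.tail))
  else []
termination_by (cols.headD []).length
decreasing_by
  obtain ⟨hne, hall⟩ := h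
  cases cols with
  | nil => exact absurd rfl hne
  | cons x xs =>
    simp only [List.all_cons, Bool.and_eq_true, Bool.not_eq_true'] at hall
    simp only [List.headD_cons]
    have hx : x ≠ [] := by
      intro hx; rw [hx] at hall; simp at hall
    cases x with
    | nil => exact absurd rfl hx
    | cons a t => simp

def visualize_state_alt (state : List (List String)) : String :=
  let n := state.length
  let h : Int :=
    (PySem.List.max? (state.map (fun tube => (tube.length : Int))) (fun x => x)).getD 0
  let padded := state.map (fun tube => tube ++ List.replicate (h - (tube.length : Int)).toNat " ")
  let rows := (zipCols padded).map (fun level => PySem.Str.join " | " level)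
  let rows := rows.reverse
  let rows := rows ++ [String.ofList (PySem.List.pyRepeat "--".toList (n : Int))]
  let rows := rows ++
    [PySem.Str.join "   " ((PySem.List.pyRange 0 (n : Int) 1).map PySem.Int.toStr)]
  PySem.Str.join "\n" rows

-- ===== PRECONDITION & SPEC =====
def Spec_visualize_state (state : List (List String)) (out : String) : Prop := out = visualize_state_alt state
instance (state : List (List String)) (out : String) : Decidable (Spec_visualize_state state out) := by unfold Spec_visualize_state; infer_instance

-- ===== CLAIM (what is proved, stated in full; the proofs are below) =====
def Claim_equal_visualize_state : Prop := ∀ (state : List (List String)), Dom_visualize_state state → Spec_visualize_state state (visualize_state state)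

-- ===== LEMMAS AND PROOFS =====

theorem getD_tail {α : Type} (c : List α) (i : Nat) (d : α) :
    c.tail.getD i d = c.getD (i + 1) d := by
  cases c <;> simp [List.getD]

-- On a rectangular block (every column of length h, at least one column),
-- zipCols produces the h level-rows, bottom index first.
theorem zipCols_rect (h : Nat) :
    ∀ (cols : List (List String)), cols ≠ [] → (∀ c ∈ cols, c.length = h) →
      zipCols cols = (List.range h).map (fun i => cols.map (fun c => c.getD i " ")) := by
  induction h with
  | zero =>
    intro cols hne hlen
    rw [zipCols]
    rw [dif_neg]
    · simp
    · rintro ⟨-, hall⟩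
      cases cols with
      | nil => exact hne rfl
      | cons x xs =>
        have hx := hlen x (by simp)
        simp only [List.all_cons, Bool.and_eq_true, Bool.not_eq_true'] at hall
        rw [List.length_eq_zero_iff] at hx
        rw [hx] at hall
        simp at hall
  | succ m ih =>
    intro cols hne hlen
    rw [zipCols]
    rw [dif_pos]
    · have htail : ∀ c ∈ cols.map (fun c => c.tail), c.length = m := by
        intro c hc
        simp only [List.mem_map] at hc
        obtain ⟨c0, hc0, rfl⟩ := hc
        have := hlen c0 hc0
        simp [List.length_tail, this]
      have hne' : cols.map (fun c => c.tail) ≠ [] := by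
        simp [hne]
      rw [ih _ hne' htail]
      rw [List.range_succ_eq_map]
      simp only [List.map_cons, List.map_map]
      congr 1
      · apply List.map_congr_left
        intro c hc
        have hc0 : c ≠ [] := by
          intro hnil
          have := hlen c hc; rw [hnil] at this; simp at this
        cases c with
        | nil => exact absurd rfl hc0
        | cons a t => simp [List.getD]
      · apply List.map_congr_left
        intro i _
        simp only [Function.comp]
        apply List.map_congr_left
        intro c _
        exact getD_tail c i " "
    · constructor
      · exact hne
      · rw [List.all_eq_true]
        intro c hc
        have := hlen c hc
        simp only [Bool.not_eq_true', List.isEmpty_eq_false_iff]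
        intro hnil
        rw [hnil] at this; simp at this

theorem rows_eq (state : List (List String)) (hne : state ≠ []) :
    let h : Int :=
      (PySem.List.max? (state.map (fun tube => (tube.length : Int))) (fun x => x)).getD 0
    (PySem.List.pyRange (h - 1) (-1) (-1)).map (fun level =>
      PySem.Str.join " | "
        (state.map (fun tube =>
          if level < (tube.length : Int) then (PySem.List.pyGet? tube level).getD " " else " "))) =
    ((zipCols (state.map (fun tube =>
        tube ++ List.replicate (h - (tube.length : Int)).toNat " "))).map
      (fun level => PySem.Str.join " | " level)).reverse := by
  intro h
  -- facts about h
  obtain ⟨m, hm⟩ : ∃ m, PySem.List.max? (state.map (fun tube => (tube.length : Int))) (fun x => x) = some m := by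
    cases hmx : PySem.List.max? (state.map (fun tube => (tube.length : Int))) (fun x => x) with
    | none =>
      rw [PySem.List.max?_eq_none_iff] at hmx
      simp [hne] at hmx
    | some m => exact ⟨m, rfl⟩
  have hmax : ∀ tube ∈ state, (tube.length : Int) ≤ h := by
    intro tube ht
    have := PySem.List.max?_isMax hm (tube.length : Int) (List.mem_map_of_mem ht)
    simpa [h, hm] using this
  have h0 : 0 ≤ h := by
    cases state with
    | nil => exact absurd rfl hne
    | cons t ts =>
      have := hmax t (by simp)
      have : (0 : Int) ≤ (t.length : Int) := by positivity
      omega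
  set H := h.toNat with hH
  have hhH : h = (H : Int) := by omega
  -- padded columns are rectangular of height H
  have hpadlen : ∀ c ∈ state.map (fun tube =>
      tube ++ List.replicate (h - (tube.length : Int)).toNat " "), c.length = H := by
    intro c hc
    simp only [List.mem_map] at hc
    obtain ⟨t, ht, rfl⟩ := hc
    have := hmax t ht
    simp only [List.length_append, List.length_replicate]
    omega
  have hpne : state.map (fun tube =>
      tube ++ List.replicate (h - (tube.length : Int)).toNat " ") ≠ [] := by
    simp [hne]
  rw [zipCols_rect H _ hpne hpadlen]
  rw [PySem.List.pyRange_neg_one]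
  have harg : (h - 1 - (-1)).toNat = H := by omega
  rw [harg]
  -- both sides are maps over List.range H (one reversed); compare via getElem
  apply List.ext_getElem
  · simp
  · intro i hi1 hi2
    simp only [List.length_map, List.length_range] at hi1
    simp only [List.getElem_map, List.getElem_reverse, List.length_map,
      List.length_range, List.getElem_range]
    congr 1
    rw [List.map_map]
    apply List.map_congr_left
    intro tube htube
    simp only [Function.comp_apply]
    have hlt : (tube.length : Int) ≤ h := hmax tube htube
    have hirange : (i : Int) < h := by omega
    have hlevel : h - 1 - (i : Int) = ((H - 1 - i : Nat) : Int) := by omega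
    by_cases hcase : h - 1 - (i : Int) < (tube.length : Int)
    · rw [if_pos hcase]
      have hnn : (0 : Int) ≤ h - 1 - (i : Int) := by omega
      have hnat : H - 1 - i < tube.length := by omega
      rw [hlevel, PySem.List.pyGet?_natCast]
      rw [List.getElem?_eq_getElem hnat]
      simp only [Option.getD_some]
      rw [List.getD_eq_getElem?_getD, List.getElem?_append_left hnat,
        List.getElem?_eq_getElem hnat]
      rfl
    · rw [if_neg hcase]
      have hnat : ¬ (H - 1 - i < tube.length) := by omega
      rw [List.getD_eq_getElem?_getD, List.getElem?_append_right (by omega)]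
      rw [List.getElem?_replicate]
      rw [if_pos (by omega)]
      rfl

-- ===== VERDICT (by name: the statement is the Claim_ definition above) =====
theorem visualize_state_spec : Claim_equal_visualize_state := by
  intro state _
  unfold Spec_visualize_state visualize_state visualize_state_alt
  by_cases hne : state = []
  · subst hne
    have hz : zipCols [] = [] := by rw [zipCols]; simp
    simp only [List.map_nil, hz, List.reverse_nil]
    rfl
  · simp only []
    congr 1
    congr 1
    congr 1
    exact rows_eq state hne
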